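-- pv_equiv track=rewrite | github.com/nicehiro/LeetCode | subsets_2.py | is_in_list
-- ===== SOURCE A (Python) =====
-- from copy import deepcopy
--
-- def is_in_list(x, y):
--     y = deepcopy(y)
--     for l in y:
--         if len(x) == len(l):
--             for i in x:
--                 if i in l:
--                     l.remove(i)
--             if len(l) == 0:
--                 return True
--     return False
-- ===== SOURCE B (Python) =====
-- def is_in_list(x, y):
--     key = sorted(x)
--     n = len(x)
--     return any(len(l) == n and sorted(l) == key for l in y)
-- ===== Notes on version B (the rewrite author's own statement) =====
-- stated objective: simpler
-- what changed: Replaces A's per-row membership-and-remove scanning (plus a deepcopy of y) with comparing each equal-length row's sorted canonical form against sorted(x) once.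
import Mathlib
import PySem

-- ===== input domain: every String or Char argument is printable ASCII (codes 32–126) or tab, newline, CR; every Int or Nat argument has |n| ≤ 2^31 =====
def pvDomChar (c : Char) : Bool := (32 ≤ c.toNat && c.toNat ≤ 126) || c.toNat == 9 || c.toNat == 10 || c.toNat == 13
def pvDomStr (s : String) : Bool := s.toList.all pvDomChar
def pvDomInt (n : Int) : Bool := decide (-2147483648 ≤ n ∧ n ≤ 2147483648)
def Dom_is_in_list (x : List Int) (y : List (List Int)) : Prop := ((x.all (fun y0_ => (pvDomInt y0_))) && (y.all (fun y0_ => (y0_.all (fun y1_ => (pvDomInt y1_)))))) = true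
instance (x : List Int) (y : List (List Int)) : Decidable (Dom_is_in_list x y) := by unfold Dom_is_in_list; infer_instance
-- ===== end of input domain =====

-- B replaces A's per-row membership-and-remove scanning (and deepcopy) with a sorted-canonical-form
-- comparison; objective: simpler. A's deepcopy means A never mutates its caller's arguments either.

-- ===== PORT A =====
-- inner 'for i in x: if i in l: l.remove(i)' (l is the mutable loop state)
def isInListRemove (x l : List Int) : List Int :=
  x.foldl (fun acc i => if acc.contains i then (PySem.List.remove? acc i).getD acc else acc) l

-- outer 'for l in y: …' with its early return
def isInListGo (x : List Int) : List (List Int) → Bool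
  | [] => false
  | l :: rest =>
    if x.length == l.length then
      (if (isInListRemove x l).length == 0 then true else isInListGo x rest)
    else isInListGo x rest

def is_in_list (x : List Int) (y : List (List Int)) : Bool :=
  isInListGo x y

-- ===== PORT B =====
def is_in_list_alt (x : List Int) (y : List (List Int)) : Bool :=
  let key := PySem.List.sorted x (fun v => v) false
  let n := x.length
  y.any (fun l => l.length == n && PySem.List.sorted l (fun v => v) false == key)

-- ===== PRECONDITION & SPEC =====
def Spec_is_in_list (x : List Int) (y : List (List Int)) (out : Bool) : Prop := out = is_in_list_alt x y
instance (x : List Int) (y : List (List Int)) (out : Bool) : Decidable (Spec_is_in_list x y out) := by unfold Spec_is_in_list; infer_instance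

-- ===== CLAIM (what is proved, stated in full; the proofs are below) =====
def Claim_equal_is_in_list : Prop := ∀ (x : List Int) (y : List (List Int)), Dom_is_in_list x y → Spec_is_in_list x y (is_in_list x y)

-- ===== LEMMAS AND PROOFS =====

-- the remove loop is exactly a foldl of List.erase (erase is the identity when the value is absent)
theorem isInListRemove_eq_foldl_erase (x l : List Int) :
    isInListRemove x l = x.foldl List.erase l := by
  unfold isInListRemove
  congr 1
  funext acc i
  by_cases h : i ∈ acc
  · simp [h, PySem.List.remove?_eq_some_erase acc i h]
  · simp [h, List.erase_of_not_mem h]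

theorem length_le_diff_add (l x : List Int) :
    l.length ≤ (x.foldl List.erase l).length + x.length := by
  induction x generalizing l with
  | nil => simp
  | cons i x ih =>
    simp only [List.foldl_cons, List.length_cons]
    have h1 := ih (l.erase i)
    have h2 : l.length ≤ (l.erase i).length + 1 := by
      by_cases hm : i ∈ l
      · have hpos : 0 < l.length := List.length_pos_of_mem hm
        rw [List.length_erase, if_pos hm]; omega
      · rw [List.length_erase, if_neg hm]; omega
    omega

-- A's per-row test characterised: lengths equal and the remove loop empties l  ↔  l is a permutation of x
theorem row_perm_iff (x l : List Int) :
    (x.length = l.length ∧ x.foldl List.erase l = []) ↔ l.Perm x := by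
  induction x generalizing l with
  | nil =>
    simp only [List.length_nil, List.foldl_nil]
    constructor
    · rintro ⟨h1, h2⟩; subst h2; exact List.Perm.refl _
    · intro h; have := h.length_eq; simp at this; simp [this]
  | cons i x ih =>
    simp only [List.foldl_cons, List.length_cons]
    by_cases hmem : i ∈ l
    · have hlen_e : (l.erase i).length = l.length - 1 := by
        rw [List.length_erase, if_pos hmem]
      have hpos : 0 < l.length := List.length_pos_of_mem hmem
      constructor
      · rintro ⟨h1, h2⟩
        have hlen : x.length = (l.erase i).length := by omega
        have hperm : (l.erase i).Perm x := (ih (l.erase i)).mp ⟨hlen, h2⟩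
        exact (List.perm_cons_erase hmem).trans (List.Perm.cons i hperm)
      · intro h
        have hperm : (l.erase i).Perm x :=
          ((List.cons_perm_iff_perm_erase.mp h.symm).2).symm
        have hlen := hperm.length_eq
        exact ⟨by omega, ((ih (l.erase i)).mpr hperm).2⟩
    · rw [List.erase_of_not_mem hmem]
      constructor
      · rintro ⟨h1, h2⟩
        exfalso
        have hle := length_le_diff_add l x
        rw [h2] at hle
        simp at hle
        omega
      · intro h
        exact absurd (h.mem_iff.mpr List.mem_cons_self) hmem

-- the core equivalence: both loops decide "some row of y is a permutation of x"
theorem go_eq_any (x : List Int) (y : List (List Int)) :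
    isInListGo x y
      = y.any (fun l => l.length == x.length &&
          (PySem.List.sorted l (fun v => v) false == PySem.List.sorted x (fun v => v) false)) := by
  induction y with
  | nil => simp [isInListGo]
  | cons l rest ih =>
    have hA : isInListGo x (l :: rest) = ((decide (l.Perm x)) || isInListGo x rest) := by
      simp only [isInListGo]
      by_cases h1 : x.length = l.length
      · by_cases h2 : (isInListRemove x l).length = 0
        · have hp : l.Perm x := (row_perm_iff x l).mp
            ⟨h1, by rw [← isInListRemove_eq_foldl_erase]; exact List.length_eq_zero_iff.mp h2⟩
          simp [h1, h2, hp]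
        · have hnp : ¬ l.Perm x := by
            intro hp
            exact h2 (by
              rw [isInListRemove_eq_foldl_erase, ((row_perm_iff x l).mpr hp).2]; rfl)
          simp [h1, h2, hnp]
      · have hnp : ¬ l.Perm x := fun hp => h1 hp.length_eq.symm
        simp [h1, hnp]
    have hB : (l.length == x.length &&
        (PySem.List.sorted l (fun v => v) false == PySem.List.sorted x (fun v => v) false))
        = decide (l.Perm x) := by
      by_cases hp : l.Perm x
      · simp [hp, hp.length_eq,
          (PySem.List.sorted_id_eq_sorted_id_iff_perm l x).mpr hp]
      · by_cases hl : l.length = x.length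
        · have hs : PySem.List.sorted l (fun v => v) false ≠ PySem.List.sorted x (fun v => v) false := by
            intro h; exact hp ((PySem.List.sorted_id_eq_sorted_id_iff_perm l x).mp h)
          simp [hp, hl, hs]
        · simp [hp, hl]
    rw [hA, ih, List.any_cons, hB]

-- ===== VERDICT (by name: the statement is the Claim_ definition above) =====
theorem is_in_list_spec : Claim_equal_is_in_list := by
  intro x y _
  unfold Spec_is_in_list is_in_list is_in_list_alt
  exact go_eq_any x y
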